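-- pv_equiv track=rewrite | github.com/Jvanrhijn/tsp-local-search | scripts/sumbound.py | decomposition
-- ===== SOURCE A (Python) =====
-- def decomposition(red_edges, blue_edges):
--     vs = list(range(2*len(red_edges)))
--
--     decomps = []
--
--     for i in vs[:len(red_edges)]:
--
--         u = vs[i]
--         v = u + 3
--
--         cycle_vs = list(range(u, v+1))
--         subcycle = list(zip(cycle_vs, cycle_vs[1:]))
--
--         reds = set(red_edges).intersection(set(subcycle))
--         blues = set(blue_edges).intersection(set(subcycle))
--
--         if len(reds) < len(blues):
--             reds = reds.union({(u, v)})
--         else: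
--             blues = blues .union({(u, v)})
--
--         decomps.append((reds, blues))
--
--     return decomps
-- ===== SOURCE B (Python) =====
-- def decomposition(red_edges, blue_edges):
--     # Scatter pass: each consecutive edge (a, a+1) is routed directly to the
--     # windows u in {a-2, a-1, a} that contain it, instead of intersecting each
--     # window's subcycle with the full edge sets.
--     n = len(red_edges)
--     wins = [([], []) for _ in range(n)]
--     for (a, b) in red_edges:
--         if b == a + 1:
--             for u in range(max(a - 2, 0), min(a, n - 1) + 1):
--                 reds = wins[u][0]
--                 if (a, b) not in reds:
--                     reds.append((a, b))
--     for (a, b) in blue_edges: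
--         if b == a + 1:
--             for u in range(max(a - 2, 0), min(a, n - 1) + 1):
--                 blues = wins[u][1]
--                 if (a, b) not in blues:
--                     blues.append((a, b))
--     out = []
--     for u, (reds, blues) in enumerate(wins):
--         if len(reds) < len(blues):
--             reds = reds + [(u, u + 3)]
--         else:
--             blues = blues + [(u, u + 3)]
--         out.append((set(reds), set(blues)))
--     return out
-- ===== Notes on version B (the rewrite author's own statement) =====
-- stated objective: faster
-- what changed: B replaces A's per-window set-intersection (building each window's subcycle and intersecting the full red/blue edge sets against it) by a single scatter pass that routes each consecutive edge (a, a+1) directly into the up-to-three windows u in {a-2, a-1, a} that contain it, followed by one pass over the windows to place the spanning edge.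
import Mathlib
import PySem

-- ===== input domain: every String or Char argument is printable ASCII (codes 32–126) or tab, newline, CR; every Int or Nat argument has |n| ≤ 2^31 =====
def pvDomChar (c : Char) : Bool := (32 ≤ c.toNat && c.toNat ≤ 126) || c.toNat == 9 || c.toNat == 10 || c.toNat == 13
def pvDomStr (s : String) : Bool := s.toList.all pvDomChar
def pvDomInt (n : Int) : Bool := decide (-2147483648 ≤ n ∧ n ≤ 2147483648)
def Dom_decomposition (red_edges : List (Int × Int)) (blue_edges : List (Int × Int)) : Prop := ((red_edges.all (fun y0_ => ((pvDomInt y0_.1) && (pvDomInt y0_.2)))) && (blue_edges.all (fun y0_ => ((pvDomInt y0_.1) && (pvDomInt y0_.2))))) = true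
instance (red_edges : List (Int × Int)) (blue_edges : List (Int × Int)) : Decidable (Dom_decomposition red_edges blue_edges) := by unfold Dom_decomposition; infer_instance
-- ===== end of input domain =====

-- B scatters each consecutive edge directly into the (at most three) windows containing it,
-- instead of intersecting every window's subcycle against the full edge sets (objective: faster; measured).


-- ===== PORT A =====
def decomposition (red_edges : List (Int × Int)) (blue_edges : List (Int × Int)) : List ((List (Int × Int)) × (List (Int × Int))) :=
  -- vs = list(range(2*len(red_edges)))
  let vs := PySem.List.pyRange 0 (2 * (red_edges.length : Int)) 1
  -- for i in vs[:len(red_edges)]: … decomps.append((reds, blues))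
  (PySem.List.slice vs none (some (red_edges.length : Int))).foldl (fun decomps i =>
    let u := PySem.List.pyGetD vs i 0        -- u = vs[i]; i is always a valid index here
    let v := u + 3
    let cycle_vs := PySem.List.pyRange u (v + 1) 1
    let subcycle := cycle_vs.zip (PySem.List.slice cycle_vs (some 1) none)   -- zip(cycle_vs, cycle_vs[1:])
    let reds := PySem.Set.inter (PySem.Set.ofList red_edges) (PySem.Set.ofList subcycle)
    let blues := PySem.Set.inter (PySem.Set.ofList blue_edges) (PySem.Set.ofList subcycle)
    let rb := if reds.length < blues.length
      then (PySem.Set.union reds (PySem.Set.ofList [(u, v)]), blues)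
      else (reds, PySem.Set.union blues (PySem.Set.ofList [(u, v)]))
    decomps ++ [rb]) []

-- ===== PORT B =====
-- scatter one red edge e into every window u in range(max(a-2,0), min(a,n-1)+1)
-- ('if e not in reds: reds.append(e)' is exactly PySem.Set.add; u ≥ 0 on the range, so u.toNat is exact)
def pvAddR (n : Int) (wins : List ((List (Int × Int)) × (List (Int × Int)))) (e : Int × Int) :
    List ((List (Int × Int)) × (List (Int × Int))) :=
  if e.2 = e.1 + 1 then
    (PySem.List.pyRange (max (e.1 - 2) 0) (min e.1 (n - 1) + 1) 1).foldl
      (fun w u => w.modify u.toNat (fun p => (PySem.Set.add p.1 e, p.2))) wins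
  else wins

def pvAddB (n : Int) (wins : List ((List (Int × Int)) × (List (Int × Int)))) (e : Int × Int) :
    List ((List (Int × Int)) × (List (Int × Int))) :=
  if e.2 = e.1 + 1 then
    (PySem.List.pyRange (max (e.1 - 2) 0) (min e.1 (n - 1) + 1) 1).foldl
      (fun w u => w.modify u.toNat (fun p => (p.1, PySem.Set.add p.2 e))) wins
  else wins

def decomposition_alt (red_edges : List (Int × Int)) (blue_edges : List (Int × Int)) : List ((List (Int × Int)) × (List (Int × Int))) :=
  let n : Int := red_edges.length
  let wins0 := (PySem.List.pyRange 0 n 1).map (fun _ => (([] : List (Int × Int)), ([] : List (Int × Int))))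
  let wins1 := red_edges.foldl (pvAddR n) wins0
  let wins2 := blue_edges.foldl (pvAddB n) wins1
  (PySem.List.enumerate wins2 0).foldl (fun out p =>
    let u := p.1
    let rb := if p.2.1.length < p.2.2.length
      then (p.2.1 ++ [(u, u + 3)], p.2.2)
      else (p.2.1, p.2.2 ++ [(u, u + 3)])
    out ++ [(PySem.Set.ofList rb.1, PySem.Set.ofList rb.2)]) []

-- ===== PRECONDITION & SPEC =====
def Spec_decomposition (red_edges : List (Int × Int)) (blue_edges : List (Int × Int)) (out : List ((List (Int × Int)) × (List (Int × Int)))) : Prop := out = decomposition_alt red_edges blue_edges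
instance (red_edges : List (Int × Int)) (blue_edges : List (Int × Int)) (out : List ((List (Int × Int)) × (List (Int × Int)))) : Decidable (Spec_decomposition red_edges blue_edges out) := by unfold Spec_decomposition; infer_instance

-- ===== CLAIM (what is proved, stated in full; the proofs are below) =====
def Claim_equal_decomposition : Prop := ∀ (red_edges : List (Int × Int)) (blue_edges : List (Int × Int)), Dom_decomposition red_edges blue_edges → Spec_decomposition red_edges blue_edges (decomposition red_edges blue_edges)

-- ===== LEMMAS AND PROOFS =====

-- window-membership test: edge e lies in the subcycle of window u
def pvWin (u : Int) (e : Int × Int) : Bool := e.2 == e.1 + 1 && decide (u ≤ e.1) && decide (e.1 ≤ u + 2)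

theorem pvRange4 (u : Int) : PySem.List.pyRange u (u + 3 + 1) 1 = [u, u + 1, u + 2, u + 3] := by
  rw [PySem.List.pyRange_one_cons (by omega), PySem.List.pyRange_one_cons (by omega),
      PySem.List.pyRange_one_cons (by omega), PySem.List.pyRange_one_cons (by omega),
      PySem.List.pyRange_one_eq_nil (by omega)]
  simp
  omega

theorem pvFilterAdd (p : (Int × Int) → Bool) (s : List (Int × Int)) (e : Int × Int) :
    (PySem.Set.add s e).filter p = if p e then PySem.Set.add (s.filter p) e else s.filter p := by
  by_cases he : e ∈ s
  · rw [PySem.Set.add_of_mem he]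
    by_cases hp : p e
    · rw [if_pos hp, PySem.Set.add_of_mem (by simp [List.mem_filter, he, hp])]
    · rw [if_neg hp]
  · rw [PySem.Set.add_of_not_mem he, List.filter_append]
    by_cases hp : p e
    · rw [if_pos hp, PySem.Set.add_of_not_mem (by simp [List.mem_filter, he])]
      simp [hp]
    · simp [hp]

theorem pvFilterOfList (l : List (Int × Int)) (p : (Int × Int) → Bool) :
    (PySem.Set.ofList l).filter p = l.foldl (fun s e => if p e then PySem.Set.add s e else s) [] := by
  induction l using List.reverseRecOn with
  | nil => rfl
  | append_singleton l e ih =>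
      rw [PySem.Set.ofList_append_singleton, pvFilterAdd]
      simp only [List.foldl_append, List.foldl_cons, List.foldl_nil]
      rw [← ih]

theorem pvFoldlModifyLen {W : Type} (f : W → W) (us : List Int) (w : List W) :
    (us.foldl (fun w u => w.modify u.toNat f) w).length = w.length := by
  induction us generalizing w with
  | nil => rfl
  | cons u us ih => simp [List.foldl_cons, ih, List.length_modify]

-- index lemma for a fold of modify over a contiguous nonnegative range
theorem pvFoldlModifyRange {W : Type} (f : W → W) (lo hi : Int) (hlo : 0 ≤ lo)
    (w : List W) (k : Nat) (hk : k < w.length)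
    (h2 : k < ((PySem.List.pyRange lo hi 1).foldl (fun w u => w.modify u.toNat f) w).length) :
    ((PySem.List.pyRange lo hi 1).foldl (fun w u => w.modify u.toNat f) w)[k] =
      if lo ≤ (k : Int) ∧ (k : Int) < hi then f w[k] else w[k] := by
  induction hd : (hi - lo).toNat generalizing lo w with
  | zero =>
      simp only [PySem.List.pyRange_one_eq_nil (show hi ≤ lo by omega), List.foldl_nil]
      rw [if_neg (by omega)]
  | succ d ih =>
      have hlt : lo < hi := by omega
      simp only [PySem.List.pyRange_one_cons hlt, List.foldl_cons] at h2 ⊢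
      have hlen : (w.modify lo.toNat f).length = w.length := List.length_modify ..
      rw [ih (lo + 1) (by omega) (w.modify lo.toNat f) (by omega) h2 (by omega)]
      rw [List.getElem_modify (h := by omega)]
      have : lo.toNat = k ↔ lo = (k : Int) := by omega
      split_ifs with c1 c2 c3 c4 <;> first | rfl | omega

theorem pvAddR_length (n : Int) (w : List ((List (Int × Int)) × (List (Int × Int)))) (e : Int × Int) :
    (pvAddR n w e).length = w.length := by
  unfold pvAddR; split
  · exact pvFoldlModifyLen ..
  · rfl

theorem pvAddB_length (n : Int) (w : List ((List (Int × Int)) × (List (Int × Int)))) (e : Int × Int) :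
    (pvAddB n w e).length = w.length := by
  unfold pvAddB; split
  · exact pvFoldlModifyLen ..
  · rfl

theorem pvFoldlAddR_length (n : Int) (l : List (Int × Int)) (w : List ((List (Int × Int)) × (List (Int × Int)))) :
    (l.foldl (pvAddR n) w).length = w.length := by
  induction l generalizing w with
  | nil => rfl
  | cons e l ih => simp [List.foldl_cons, ih, pvAddR_length]

theorem pvFoldlAddB_length (n : Int) (l : List (Int × Int)) (w : List ((List (Int × Int)) × (List (Int × Int)))) :
    (l.foldl (pvAddB n) w).length = w.length := by
  induction l generalizing w with
  | nil => rfl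
  | cons e l ih => simp [List.foldl_cons, ih, pvAddB_length]

theorem pvAddR_getElem (n : Int) (w : List ((List (Int × Int)) × (List (Int × Int)))) (e : Int × Int)
    (k : Nat) (hk : k < w.length) (hkn : (k : Int) < n) :
    (pvAddR n w e)[k]? = some (if pvWin (k : Int) e then (PySem.Set.add w[k].1 e, w[k].2) else w[k]) := by
  unfold pvAddR
  by_cases hc : e.2 = e.1 + 1
  · simp only [if_pos hc]
    have h2 : k < ((PySem.List.pyRange (max (e.1 - 2) 0) (min e.1 (n - 1) + 1) 1).foldl
        (fun w u => w.modify u.toNat (fun p => (PySem.Set.add p.1 e, p.2))) w).length := by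
      rw [pvFoldlModifyLen]; exact hk
    rw [List.getElem?_eq_getElem h2,
        pvFoldlModifyRange (f := fun p => (PySem.Set.add p.1 e, p.2)) _ _ (le_max_right _ _) w k hk h2]
    have hiff : (max (e.1 - 2) 0 ≤ (k : Int) ∧ (k : Int) < min e.1 (n - 1) + 1) ↔ pvWin (k : Int) e = true := by
      simp only [pvWin, hc, Bool.and_eq_true, beq_self_eq_true, true_and, decide_eq_true_eq]
      omega
    by_cases hw : pvWin (k : Int) e = true
    · rw [if_pos (hiff.mpr hw), if_pos hw]
    · rw [if_neg (fun hx => hw (hiff.mp hx)), if_neg hw]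
  · simp only [if_neg hc]
    rw [if_neg (by simp [pvWin, hc]), List.getElem?_eq_getElem hk]

theorem pvAddB_getElem (n : Int) (w : List ((List (Int × Int)) × (List (Int × Int)))) (e : Int × Int)
    (k : Nat) (hk : k < w.length) (hkn : (k : Int) < n) :
    (pvAddB n w e)[k]? = some (if pvWin (k : Int) e then (w[k].1, PySem.Set.add w[k].2 e) else w[k]) := by
  unfold pvAddB
  by_cases hc : e.2 = e.1 + 1
  · simp only [if_pos hc]
    have h2 : k < ((PySem.List.pyRange (max (e.1 - 2) 0) (min e.1 (n - 1) + 1) 1).foldl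
        (fun w u => w.modify u.toNat (fun p => (p.1, PySem.Set.add p.2 e))) w).length := by
      rw [pvFoldlModifyLen]; exact hk
    rw [List.getElem?_eq_getElem h2,
        pvFoldlModifyRange (f := fun p => (p.1, PySem.Set.add p.2 e)) _ _ (le_max_right _ _) w k hk h2]
    have hiff : (max (e.1 - 2) 0 ≤ (k : Int) ∧ (k : Int) < min e.1 (n - 1) + 1) ↔ pvWin (k : Int) e = true := by
      simp only [pvWin, hc, Bool.and_eq_true, beq_self_eq_true, true_and, decide_eq_true_eq]
      omega
    by_cases hw : pvWin (k : Int) e = true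
    · rw [if_pos (hiff.mpr hw), if_pos hw]
    · rw [if_neg (fun hx => hw (hiff.mp hx)), if_neg hw]
  · simp only [if_neg hc]
    rw [if_neg (by simp [pvWin, hc]), List.getElem?_eq_getElem hk]

theorem pvScatterR_getElem (n : Int) (l : List (Int × Int)) (w : List ((List (Int × Int)) × (List (Int × Int))))
    (k : Nat) (hk : k < w.length) (hkn : (k : Int) < n) :
    (l.foldl (pvAddR n) w)[k]? =
      some (l.foldl (fun s e => if pvWin (k : Int) e then PySem.Set.add s e else s) w[k].1, w[k].2) := by
  induction l generalizing w with
  | nil => simp [List.getElem?_eq_getElem hk]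
  | cons e l ih =>
      simp only [List.foldl_cons]
      have hk' : k < (pvAddR n w e).length := by rw [pvAddR_length]; exact hk
      rw [ih (pvAddR n w e) hk']
      have := pvAddR_getElem n w e k hk hkn
      rw [List.getElem?_eq_getElem hk'] at this
      rw [Option.some_inj.mp this]
      by_cases hw : pvWin (k : Int) e = true
      · rw [if_pos hw, if_pos hw]
      · rw [if_neg hw, if_neg hw]

theorem pvScatterB_getElem (n : Int) (l : List (Int × Int)) (w : List ((List (Int × Int)) × (List (Int × Int))))
    (k : Nat) (hk : k < w.length) (hkn : (k : Int) < n) :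
    (l.foldl (pvAddB n) w)[k]? =
      some (w[k].1, l.foldl (fun s e => if pvWin (k : Int) e then PySem.Set.add s e else s) w[k].2) := by
  induction l generalizing w with
  | nil => simp [List.getElem?_eq_getElem hk]
  | cons e l ih =>
      simp only [List.foldl_cons]
      have hk' : k < (pvAddB n w e).length := by rw [pvAddB_length]; exact hk
      rw [ih (pvAddB n w e) hk']
      have := pvAddB_getElem n w e k hk hkn
      rw [List.getElem?_eq_getElem hk'] at this
      rw [Option.some_inj.mp this]
      by_cases hw : pvWin (k : Int) e = true
      · rw [if_pos hw, if_pos hw]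
      · rw [if_neg hw, if_neg hw]

def pvAElem (red blue : List (Int × Int)) (u : Int) : (List (Int × Int)) × (List (Int × Int)) :=
  let reds := (PySem.Set.ofList red).filter (pvWin u)
  let blues := (PySem.Set.ofList blue).filter (pvWin u)
  if reds.length < blues.length then (reds ++ [(u, u + 3)], blues) else (reds, blues ++ [(u, u + 3)])

theorem pvSubcycle (u : Int) :
    (PySem.List.pyRange u (u + 3 + 1) 1).zip (PySem.List.slice (PySem.List.pyRange u (u + 3 + 1) 1) (some 1) none)
      = [(u, u + 1), (u + 1, u + 2), (u + 2, u + 3)] := by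
  rw [pvRange4, PySem.List.slice_from_one]
  rfl

theorem pvSubcycleNodup (u : Int) : ([(u, u + 1), (u + 1, u + 2), (u + 2, u + 3)] : List (Int × Int)).Nodup := by
  simp [Prod.ext_iff]

theorem pvContainsSub (u : Int) (x : Int × Int) :
    ([(u, u + 1), (u + 1, u + 2), (u + 2, u + 3)] : List (Int × Int)).contains x = pvWin u x := by
  rw [Bool.eq_iff_iff, List.contains_iff_mem]
  obtain ⟨a, b⟩ := x
  simp [pvWin, Prod.ext_iff]
  omega

theorem pvSpanNotMemFilter (l : List (Int × Int)) (u : Int) :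
    (u, u + 3) ∉ (PySem.Set.ofList l).filter (pvWin u) := by
  simp [List.mem_filter, pvWin]

theorem pvInterEq (l : List (Int × Int)) (u : Int) :
    PySem.Set.inter (PySem.Set.ofList l)
        (PySem.Set.ofList [(u, u + 1), (u + 1, u + 2), (u + 2, u + 3)])
      = (PySem.Set.ofList l).filter (pvWin u) := by
  rw [PySem.Set.ofList_eq_self_of_nodup _ (pvSubcycleNodup u)]
  show List.filter _ _ = _
  exact List.filter_congr (fun x _ => pvContainsSub u x)

theorem pvUnionSpan (l : List (Int × Int)) (u : Int) :
    PySem.Set.union ((PySem.Set.ofList l).filter (pvWin u)) (PySem.Set.ofList [(u, u + 3)])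
      = (PySem.Set.ofList l).filter (pvWin u) ++ [(u, u + 3)] := by
  rw [PySem.Set.ofList_eq_self_of_nodup [(u, u + 3)] (by simp)]
  exact PySem.Set.update_eq_append_of_disjoint _ _ (by simp)
    (by intro x hx; simp at hx; subst hx; exact pvSpanNotMemFilter l u)

theorem pvA_eq (red blue : List (Int × Int)) :
    decomposition red blue = (List.range red.length).map (fun k : Nat => pvAElem red blue (k : Int)) := by
  simp only [decomposition]
  rw [PySem.List.slice_to_natCast]
  refine (PySem.List.foldl_congr_mem _ _ (fun d i => d ++ [pvAElem red blue i]) [] ?_).trans ?_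
  · intro acc i hi
    have hmem : i ∈ PySem.List.pyRange 0 (2 * (red.length : Int)) 1 := List.mem_of_mem_take hi
    rw [PySem.List.mem_pyRange_one] at hmem
    have hu : PySem.List.pyGetD (PySem.List.pyRange 0 (2 * (red.length : Int)) 1) i 0 = i := by
      rw [PySem.List.pyGetD_of_nonneg _ _ hmem.1]
      have hlt : i.toNat < (PySem.List.pyRange 0 (2 * (red.length : Int)) 1).length := by
        rw [PySem.List.length_pyRange_one]; omega
      rw [List.getD_eq_getElem _ _ hlt, PySem.List.getElem_pyRange_one]
      omega
    rw [hu]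
    simp only [pvSubcycle, pvInterEq, pvUnionSpan, pvAElem]
  · rw [PySem.List.foldl_append_singleton_eq_map, List.nil_append]
    have htake : (PySem.List.pyRange 0 (2 * (red.length : Int)) 1).take red.length
        = PySem.List.pyRange 0 (red.length : Int) 1 := by
      rw [PySem.List.pyRange_one_append 0 (red.length : Int) (2 * (red.length : Int)) (by positivity) (by omega)]
      exact List.take_left' (by rw [PySem.List.length_pyRange_one]; omega)
    rw [htake, PySem.List.pyRange_zero_nat, List.map_map]
    rfl

theorem pvOfListFilter (l : List (Int × Int)) (u : Int) :
    PySem.Set.ofList ((PySem.Set.ofList l).filter (pvWin u)) = (PySem.Set.ofList l).filter (pvWin u) :=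
  PySem.Set.ofList_eq_self_of_nodup _ ((PySem.Set.nodup_ofList l).filter _)

theorem pvOfListFilterSpan (l : List (Int × Int)) (u : Int) :
    PySem.Set.ofList ((PySem.Set.ofList l).filter (pvWin u) ++ [(u, u + 3)])
      = (PySem.Set.ofList l).filter (pvWin u) ++ [(u, u + 3)] := by
  refine PySem.Set.ofList_eq_self_of_nodup _ ?_
  rw [List.nodup_append]
  refine ⟨(PySem.Set.nodup_ofList l).filter _, by simp, ?_⟩
  intro a ha b hb
  rcases List.mem_singleton.mp hb with rfl
  exact fun h => pvSpanNotMemFilter l u (h ▸ ha)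

theorem pvB_eq (red blue : List (Int × Int)) :
    decomposition_alt red blue = (List.range red.length).map (fun k : Nat => pvAElem red blue (k : Int)) := by
  simp only [decomposition_alt]
  rw [PySem.List.foldl_append_singleton_eq_map, List.nil_append]
  have hlen0 : ((PySem.List.pyRange 0 (red.length : Int) 1).map
      (fun _ => (([] : List (Int × Int)), ([] : List (Int × Int))))).length = red.length := by
    rw [List.length_map, PySem.List.length_pyRange_one]; omega
  have hlen1 : (red.foldl (pvAddR (red.length : Int)) _).length = red.length :=
    (pvFoldlAddR_length _ red _).trans hlen0
  have hlen2 : (blue.foldl (pvAddB (red.length : Int)) (red.foldl (pvAddR (red.length : Int)) _)).length = red.length :=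
    (pvFoldlAddB_length _ blue _).trans hlen1
  apply List.ext_getElem
  · rw [List.length_map, PySem.List.length_enumerate, List.length_map, List.length_range]
    exact hlen2
  · intro k h1 h2
    rw [List.length_map, List.length_range] at h2
    rw [List.getElem_map, List.getElem_map, List.getElem_range]
    rw [PySem.List.getElem_enumerate _ _ _ (by rw [PySem.List.length_enumerate]; omega)]
    -- compute wins2[k]
    have hk1 : k < (red.foldl (pvAddR (red.length : Int))
        ((PySem.List.pyRange 0 (red.length : Int) 1).map
          (fun _ => (([] : List (Int × Int)), ([] : List (Int × Int)))))).length := by omega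
    have hk0 : k < ((PySem.List.pyRange 0 (red.length : Int) 1).map
        (fun _ => (([] : List (Int × Int)), ([] : List (Int × Int))))).length := by omega
    have h0 : ((PySem.List.pyRange 0 (red.length : Int) 1).map
        (fun _ => (([] : List (Int × Int)), ([] : List (Int × Int)))))[k] = ([], []) := by
      rw [List.getElem_map]
    have hw1 := pvScatterR_getElem (red.length : Int) red _ k hk0 (by omega)
    rw [List.getElem?_eq_getElem hk1, h0] at hw1
    have hw2 := pvScatterB_getElem (red.length : Int) blue _ k hk1 (by omega)
    rw [List.getElem?_eq_getElem (by omega : k < (blue.foldl (pvAddB (red.length : Int)) _).length),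
        Option.some_inj.symm.mp rfl] at hw2
    rw [Option.some_inj] at hw1 hw2
    rw [hw2, hw1]
    -- now the element is built from the two per-window folds
    simp only []
    rw [← pvFilterOfList red (pvWin (k : Int)), ← pvFilterOfList blue (pvWin (k : Int))]
    simp only [zero_add, pvAElem]
    split_ifs with hc
    · rw [Prod.mk.injEq]
      exact ⟨pvOfListFilterSpan red (k : Int), pvOfListFilter blue (k : Int)⟩
    · rw [Prod.mk.injEq]
      exact ⟨pvOfListFilter red (k : Int), pvOfListFilterSpan blue (k : Int)⟩

-- ===== VERDICT (by name: the statement is the Claim_ definition above) =====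
theorem decomposition_spec : Claim_equal_decomposition := by
  intro red blue _
  unfold Spec_decomposition
  rw [pvA_eq, pvB_eq]
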